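-- pv_equiv track=rewrite | github.com/riche1996/sustenance | src/services/code_analyzer.py | _parse_rag_analysis
-- ===== SOURCE A (Python) =====
-- from typing import List, Dict, Any, Optional, Callable
--
-- def _parse_rag_analysis(analysis_text: str) -> List[Dict[str, Any]]:
--     """Parse Claude's RAG analysis into structured findings."""
--     findings = []
--
--     # Check for "not relevant" indicators
--     if "NOT RELEVANT" in analysis_text.upper() or "NO ISSUES FOUND" in analysis_text.upper():
--         return [{
--             'file': 'N/A',
--             'lines': 'N/A',
--             'issue': 'Retrieved code may not be relevant to this bug',
--             'severity': 'Unknown',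
--             'resolution': analysis_text,
--             'code_fix': ''
--         }]
--
--     # Parse structured findings
--     lines = analysis_text.split('\n')
--     current_finding = {}
--
--     for line in lines:
--         line = line.strip()
--
--         if line.startswith('- File:'):
--             if current_finding and 'file' in current_finding:
--                 findings.append(current_finding)
--             current_finding = {'file': line.replace('- File:', '').strip()}
--         elif line.startswith('- Lines:'):
--             current_finding['lines'] = line.replace('- Lines:', '').strip()
--         elif line.startswith('- Issue:'):
--             current_finding['issue'] = line.replace('- Issue:', '').strip()
--         elif line.startswith('- Severity:'):
--             current_finding['severity'] = line.replace('- Severity:', '').strip()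
--         elif line.startswith('- Root Cause:'):
--             current_finding['root_cause'] = line.replace('- Root Cause:', '').strip()
--         elif line.startswith('- Resolution:'):
--             current_finding['resolution'] = line.replace('- Resolution:', '').strip()
--         elif line.startswith('- Code Fix:'):
--             current_finding['code_fix'] = line.replace('- Code Fix:', '').strip()
--
--     # Add last finding
--     if current_finding and 'file' in current_finding:
--         findings.append(current_finding)
--
--     # If parsing failed, return raw analysis
--     if not findings and analysis_text.strip():
--         findings.append({
--             'file': 'Multiple files',
--             'lines': 'See analysis',
--             'issue': 'See detailed analysis below',
--             'severity': 'Unknown',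
--             'resolution': analysis_text,
--             'code_fix': ''
--         })
--
--     return findings
-- ===== SOURCE B (Python) =====
-- def _parse_rag_analysis(analysis_text):
--     """Parse Claude's RAG analysis into structured findings (two-pass: block partition, then field mapping)."""
--     up = analysis_text.upper()
--     if "NOT RELEVANT" in up or "NO ISSUES FOUND" in up:
--         return [{
--             'file': 'N/A',
--             'lines': 'N/A',
--             'issue': 'Retrieved code may not be relevant to this bug',
--             'severity': 'Unknown',
--             'resolution': analysis_text,
--             'code_fix': ''
--         }]
--
--     # Pass 1: partition stripped lines into blocks, one per '- File:' marker;
--     # lines before the first marker are dropped.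
--     blocks = []
--     current = None
--     for raw in analysis_text.split('\n'):
--         line = raw.strip()
--         if line.startswith('- File:'):
--             if current is not None:
--                 blocks.append(current)
--             current = [line]
--         elif current is not None:
--             current.append(line)
--     if current is not None:
--         blocks.append(current)
--
--     # Pass 2: map each block to a finding dict via a prefix -> field table.
--     fields = [('- Lines:', 'lines'), ('- Issue:', 'issue'), ('- Severity:', 'severity'),
--               ('- Root Cause:', 'root_cause'), ('- Resolution:', 'resolution'),
--               ('- Code Fix:', 'code_fix')]
--     findings = []
--     for block in blocks:
--         finding = {'file': block[0].replace('- File:', '').strip()}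
--         for line in block[1:]:
--             for prefix, key in fields:
--                 if line.startswith(prefix):
--                     finding[key] = line.replace(prefix, '').strip()
--                     break
--         findings.append(finding)
--
--     if not findings and analysis_text.strip():
--         findings.append({
--             'file': 'Multiple files',
--             'lines': 'See analysis',
--             'issue': 'See detailed analysis below',
--             'severity': 'Unknown',
--             'resolution': analysis_text,
--             'code_fix': ''
--         })
--
--     return findings
-- ===== Notes on version B (the rewrite author's own statement) =====
-- stated objective: alternative
-- what changed: A's single stateful loop (one dict accumulator with a seven-way elif chain and conditional flushes) is replaced by a two-pass decomposition: first partition the stripped lines into blocks at each File marker, then map each block to a finding dict via a prefix-to-field lookup table.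
import Mathlib
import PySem

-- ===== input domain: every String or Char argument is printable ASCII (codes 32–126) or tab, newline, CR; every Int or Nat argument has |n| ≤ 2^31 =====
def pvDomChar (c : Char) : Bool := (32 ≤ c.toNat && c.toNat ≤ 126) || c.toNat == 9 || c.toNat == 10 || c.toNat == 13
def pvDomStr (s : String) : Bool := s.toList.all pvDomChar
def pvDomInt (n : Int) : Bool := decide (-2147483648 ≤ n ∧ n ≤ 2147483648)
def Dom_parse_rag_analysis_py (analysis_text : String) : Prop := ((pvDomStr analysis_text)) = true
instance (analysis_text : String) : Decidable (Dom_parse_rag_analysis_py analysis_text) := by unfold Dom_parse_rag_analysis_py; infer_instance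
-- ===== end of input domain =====

-- B replaces A's single stateful loop by two passes — partition the stripped lines into blocks at each File marker,
-- then map each block to a finding via a prefix→field table (objective: simpler decomposition, same cost).

-- ===== PORT A =====
-- the loop body of A: state = (findings so far, current_finding)
def pvStepA (st : List (PySem.Dict String String) × PySem.Dict String String) (raw : String) :
    List (PySem.Dict String String) × PySem.Dict String String :=
  let line := PySem.Str.strip raw
  if PySem.Str.startswith line "- File:" then
    ((if !st.2.items.isEmpty && st.2.contains "file" then st.1 ++ [st.2] else st.1),
     (PySem.Dict.empty).insert "file" (PySem.Str.strip (PySem.Str.replace line "- File:" "")))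
  else if PySem.Str.startswith line "- Lines:" then
    (st.1, st.2.insert "lines" (PySem.Str.strip (PySem.Str.replace line "- Lines:" "")))
  else if PySem.Str.startswith line "- Issue:" then
    (st.1, st.2.insert "issue" (PySem.Str.strip (PySem.Str.replace line "- Issue:" "")))
  else if PySem.Str.startswith line "- Severity:" then
    (st.1, st.2.insert "severity" (PySem.Str.strip (PySem.Str.replace line "- Severity:" "")))
  else if PySem.Str.startswith line "- Root Cause:" then
    (st.1, st.2.insert "root_cause" (PySem.Str.strip (PySem.Str.replace line "- Root Cause:" "")))
  else if PySem.Str.startswith line "- Resolution:" then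
    (st.1, st.2.insert "resolution" (PySem.Str.strip (PySem.Str.replace line "- Resolution:" "")))
  else if PySem.Str.startswith line "- Code Fix:" then
    (st.1, st.2.insert "code_fix" (PySem.Str.strip (PySem.Str.replace line "- Code Fix:" "")))
  else st

def parse_rag_analysis_py (analysis_text : String) : List (List (String × String)) :=
  if PySem.Str.isIn "NOT RELEVANT" (PySem.Str.upper analysis_text)
      || PySem.Str.isIn "NO ISSUES FOUND" (PySem.Str.upper analysis_text) then
    [[("file", "N/A"), ("lines", "N/A"),
      ("issue", "Retrieved code may not be relevant to this bug"),
      ("severity", "Unknown"), ("resolution", analysis_text), ("code_fix", "")]]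
  else
    let st := ((PySem.Str.split? analysis_text "\n").getD []).foldl pvStepA ([], PySem.Dict.empty)
    let findings := if !st.2.items.isEmpty && st.2.contains "file" then st.1 ++ [st.2] else st.1
    let findings :=
      if findings.isEmpty && !(PySem.Str.strip analysis_text == "") then
        findings ++ [PySem.Dict.ofList
          [("file", "Multiple files"), ("lines", "See analysis"),
           ("issue", "See detailed analysis below"), ("severity", "Unknown"),
           ("resolution", analysis_text), ("code_fix", "")]]
      else findings
    findings.map (·.items)

-- ===== PORT B =====
def pvFields : List (String × String) :=
  [("- Lines:", "lines"), ("- Issue:", "issue"), ("- Severity:", "severity"),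
   ("- Root Cause:", "root_cause"), ("- Resolution:", "resolution"), ("- Code Fix:", "code_fix")]

-- pass 1 loop body: state = (completed blocks, current block or none)
def pvStepBlk (st : List (List String) × Option (List String)) (raw : String) :
    List (List String) × Option (List String) :=
  let line := PySem.Str.strip raw
  if PySem.Str.startswith line "- File:" then
    ((match st.2 with | some c => st.1 ++ [c] | none => st.1), some [line])
  else
    match st.2 with
    | some c => (st.1, some (c ++ [line]))
    | none => st

-- pass 2 inner loop: first matching prefix in the table (the 'for…break'), or no change
def pvApplyField (d : PySem.Dict String String) (line : String) : PySem.Dict String String :=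
  match pvFields.find? (fun pk => PySem.Str.startswith line pk.1) with
  | some (pre, key) => d.insert key (PySem.Str.strip (PySem.Str.replace line pre ""))
  | none => d

def pvBlockToDict (block : List String) : PySem.Dict String String :=
  match block with
  | [] => PySem.Dict.empty
  | hd :: tl =>
      tl.foldl pvApplyField
        ((PySem.Dict.empty).insert "file" (PySem.Str.strip (PySem.Str.replace hd "- File:" "")))

def parse_rag_analysis_py_alt (analysis_text : String) : List (List (String × String)) :=
  if PySem.Str.isIn "NOT RELEVANT" (PySem.Str.upper analysis_text)
      || PySem.Str.isIn "NO ISSUES FOUND" (PySem.Str.upper analysis_text) then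
    [[("file", "N/A"), ("lines", "N/A"),
      ("issue", "Retrieved code may not be relevant to this bug"),
      ("severity", "Unknown"), ("resolution", analysis_text), ("code_fix", "")]]
  else
    let st := ((PySem.Str.split? analysis_text "\n").getD []).foldl pvStepBlk ([], none)
    let blocks := match st.2 with | some c => st.1 ++ [c] | none => st.1
    let findings := blocks.map pvBlockToDict
    let findings :=
      if findings.isEmpty && !(PySem.Str.strip analysis_text == "") then
        findings ++ [PySem.Dict.ofList
          [("file", "Multiple files"), ("lines", "See analysis"),
           ("issue", "See detailed analysis below"), ("severity", "Unknown"),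
           ("resolution", analysis_text), ("code_fix", "")]]
      else findings
    findings.map (·.items)

-- ===== PRECONDITION & SPEC =====
def Spec_parse_rag_analysis_py (analysis_text : String) (out : List (List (String × String))) : Prop := out = parse_rag_analysis_py_alt analysis_text
instance (analysis_text : String) (out : List (List (String × String))) : Decidable (Spec_parse_rag_analysis_py analysis_text out) := by unfold Spec_parse_rag_analysis_py; infer_instance

-- ===== CLAIM (what is proved, stated in full; the proofs are below) =====
def Claim_equal_parse_rag_analysis_py : Prop := ∀ (analysis_text : String), Dom_parse_rag_analysis_py analysis_text → Spec_parse_rag_analysis_py analysis_text (parse_rag_analysis_py analysis_text)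

-- ===== LEMMAS AND PROOFS =====

-- A's state (fs, cf) is in sync with B's state (bs, cur)
def pvInv (fs : List (PySem.Dict String String)) (cf : PySem.Dict String String)
    (bs : List (List String)) (cur : Option (List String)) : Prop :=
  fs = bs.map pvBlockToDict ∧
  (match cur with
   | none => cf.contains "file" = false
   | some b => cf = pvBlockToDict b ∧ ∃ hd tl, b = hd :: tl)

theorem pv_contains_ne_file_insert (d : PySem.Dict String String) (k v : String) (hk : k ≠ "file") :
    ((d.insert k v).contains "file") = d.contains "file" := by
  simp [PySem.Dict.contains_eq_isSome_get?, PySem.Dict.get?_insert_of_ne d v (Ne.symm hk)]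

theorem pv_key_ne_file (pre key : String) (h : (pre, key) ∈ pvFields) : key ≠ "file" := by
  simp [pvFields] at h
  rcases h with ⟨_, h⟩ | ⟨_, h⟩ | ⟨_, h⟩ | ⟨_, h⟩ | ⟨_, h⟩ | ⟨_, h⟩ <;> subst h <;> decide

theorem pv_applyField_contains (d : PySem.Dict String String) (line : String) :
    ((pvApplyField d line).contains "file") = d.contains "file" := by
  unfold pvApplyField
  cases hf : pvFields.find? (fun pk => PySem.Str.startswith line pk.1) with
  | none => rfl
  | some pk =>
      obtain ⟨pre, key⟩ := pk
      exact pv_contains_ne_file_insert d key _ (pv_key_ne_file pre key (List.mem_of_find?_eq_some hf))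

theorem pv_contains_file_insert_self (d : PySem.Dict String String) (v : String) :
    ((d.insert "file" v).contains "file") = true := by
  simp [PySem.Dict.contains_eq_isSome_get?, PySem.Dict.get?_insert_self]

theorem pvBlockToDict_cons (hd : String) (tl : List String) :
    pvBlockToDict (hd :: tl) =
      tl.foldl pvApplyField
        ((PySem.Dict.empty).insert "file" (PySem.Str.strip (PySem.Str.replace hd "- File:" ""))) := rfl

theorem pv_foldl_applyField_contains (tl : List String) (d : PySem.Dict String String)
    (h : d.contains "file" = true) : ((tl.foldl pvApplyField d).contains "file") = true := by
  induction tl generalizing d with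
  | nil => exact h
  | cons a tl ih => rw [List.foldl_cons]; exact ih _ (by rw [pv_applyField_contains]; exact h)

theorem pv_blockToDict_contains (hd : String) (tl : List String) :
    ((pvBlockToDict (hd :: tl)).contains "file") = true := by
  simp only [pvBlockToDict]
  exact pv_foldl_applyField_contains tl _ (pv_contains_file_insert_self _ _)

theorem pv_contains_items_ne (d : PySem.Dict String String) (k : String)
    (h : d.contains k = true) : d.items.isEmpty = false := by
  cases hd : d.items with
  | nil => rw [PySem.Dict.contains] at h; rw [hd] at h; simp at h
  | cons p r => simp

-- A's elif chain on a non-File line is B's table lookup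
theorem pv_stepA_eq_applyField (fs : List (PySem.Dict String String))
    (cf : PySem.Dict String String) (raw : String)
    (h : PySem.Str.startswith (PySem.Str.strip raw) "- File:" = false) :
    pvStepA (fs, cf) raw = (fs, pvApplyField cf (PySem.Str.strip raw)) := by
  simp only [pvStepA, pvApplyField, pvFields, List.find?, h, Bool.false_eq_true, if_false]
  cases PySem.Str.startswith (PySem.Str.strip raw) "- Lines:" <;>
  cases PySem.Str.startswith (PySem.Str.strip raw) "- Issue:" <;>
  cases PySem.Str.startswith (PySem.Str.strip raw) "- Severity:" <;>
  cases PySem.Str.startswith (PySem.Str.strip raw) "- Root Cause:" <;>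
  cases PySem.Str.startswith (PySem.Str.strip raw) "- Resolution:" <;>
  cases PySem.Str.startswith (PySem.Str.strip raw) "- Code Fix:" <;> rfl

-- abbreviations for the two loops' end-of-loop flushes (proof helpers only)
def pvFlushA (st : List (PySem.Dict String String) × PySem.Dict String String) :
    List (PySem.Dict String String) :=
  if !st.2.items.isEmpty && st.2.contains "file" then st.1 ++ [st.2] else st.1

def pvFlushB (st : List (List String) × Option (List String)) : List (List String) :=
  match st.2 with | some c => st.1 ++ [c] | none => st.1

-- flush at end of loop: A's conditional append = B's blocks, mapped
theorem pv_flush_eq (fs : List (PySem.Dict String String)) (cf : PySem.Dict String String)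
    (bs : List (List String)) (cur : Option (List String)) (hinv : pvInv fs cf bs cur) :
    pvFlushA (fs, cf) = (pvFlushB (bs, cur)).map pvBlockToDict := by
  unfold pvFlushA pvFlushB
  obtain ⟨hfs, hcur⟩ := hinv
  cases cur with
  | none => simp [hcur, hfs]
  | some b =>
      obtain ⟨hcf, hd, tl, hb⟩ := hcur
      have hc : cf.contains "file" = true := by rw [hcf, hb]; exact pv_blockToDict_contains hd tl
      have hi := pv_contains_items_ne cf "file" hc
      rw [hc, hi]
      simp [hfs, hcf]

-- the loop invariant, carried through the whole line list
theorem pv_main (ls : List String) (fs : List (PySem.Dict String String))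
    (cf : PySem.Dict String String) (bs : List (List String)) (cur : Option (List String))
    (hinv : pvInv fs cf bs cur) :
    pvFlushA (ls.foldl pvStepA (fs, cf)) =
      (pvFlushB (ls.foldl pvStepBlk (bs, cur))).map pvBlockToDict := by
  induction ls generalizing fs cf bs cur with
  | nil => exact pv_flush_eq fs cf bs cur hinv
  | cons l rest ih =>
      simp only [List.foldl_cons]
      by_cases hF : PySem.Str.startswith (PySem.Str.strip l) "- File:" = true
      · have hA : pvStepA (fs, cf) l =
            (pvFlushA (fs, cf),
             (PySem.Dict.empty).insert "file"
               (PySem.Str.strip (PySem.Str.replace (PySem.Str.strip l) "- File:" ""))) := by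
          simp only [pvStepA, pvFlushA, hF, if_true]
        have hB : pvStepBlk (bs, cur) l = (pvFlushB (bs, cur), some [PySem.Str.strip l]) := by
          cases cur <;> simp only [pvStepBlk, pvFlushB, hF, if_true]
        rw [hA, hB]
        exact ih _ _ _ _ ⟨pv_flush_eq fs cf bs cur hinv, by
          constructor
          · simp only [pvBlockToDict, List.foldl_nil]
          · exact ⟨_, _, rfl⟩⟩
      · rw [Bool.not_eq_true] at hF
        rw [pv_stepA_eq_applyField fs cf l hF]
        obtain ⟨hfs, hcur⟩ := hinv
        cases cur with
        | none =>
            have hB : pvStepBlk (bs, none) l = (bs, none) := by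
              simp only [pvStepBlk, hF, Bool.false_eq_true, if_false]
            rw [hB]
            exact ih _ _ _ _ ⟨hfs, by
              simpa [pv_applyField_contains] using hcur⟩
        | some b =>
            obtain ⟨hcf, hd, tl, hb⟩ := hcur
            have hB : pvStepBlk (bs, some b) l = (bs, some (b ++ [PySem.Str.strip l])) := by
              simp only [pvStepBlk, hF, Bool.false_eq_true, if_false]
            rw [hB]
            refine ih _ _ _ _ ⟨hfs, ?_, hd, tl ++ [PySem.Str.strip l], by rw [hb]; rfl⟩
            rw [hcf, hb, pvBlockToDict_cons, List.cons_append, pvBlockToDict_cons,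
              List.foldl_append, List.foldl_cons, List.foldl_nil]

-- ===== VERDICT (by name: the statement is the Claim_ definition above) =====
theorem parse_rag_analysis_py_spec : Claim_equal_parse_rag_analysis_py := by
  intro analysis_text _
  unfold Spec_parse_rag_analysis_py parse_rag_analysis_py parse_rag_analysis_py_alt
  by_cases hrel : (PySem.Str.isIn "NOT RELEVANT" (PySem.Str.upper analysis_text)
      || PySem.Str.isIn "NO ISSUES FOUND" (PySem.Str.upper analysis_text)) = true
  · simp only [hrel, if_true]
  · rw [Bool.not_eq_true] at hrel
    simp only [hrel, Bool.false_eq_true, if_false]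
    have h := pv_main ((PySem.Str.split? analysis_text "\n").getD []) [] PySem.Dict.empty [] none
      ⟨rfl, rfl⟩
    unfold pvFlushA pvFlushB at h
    rw [h]
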